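-- pv_equiv track=rewrite | github.com/fsiddiqui2/Connect4MiniMax | minimax.py | horizontalEval
-- ===== SOURCE A (Python) =====
-- player1 = 1
--
-- player2 = 2
--
-- def horizontalEval(grid: list[list[int]], player: int):
--     score = 0;
--     n_rows = len(grid)
--     n_cols = len(grid[0])
--
--     for row in range(n_rows):
--         start = 0
--         end = 0
--         while end < n_cols:
--             #find the first non-empty space in the row
--             if grid[row][start] == 0:
--                 start += 1
--                 end += 1
--             else:
--                 #find the end of connected pieces
--                 while end + 1 < n_cols and grid[row][end + 1] == grid[row][start]:
--                     end += 1
--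
--                 #weight score based on number of empty spaces
--                 #for three in a row: 0 1 1 1 0 > 0 1 1 1 = 1 1 1 0
--
--                 spaces = 0
--                 if (start > 0 and grid[row][start - 1] == 0): spaces += 1
--                 if (end < n_cols - 1 and grid[row][end + 1] == 0): spaces += 1
--
--                 #three in a row
--                 if end - start == 2:
--                     if player == player1:
--                         if grid[row][start] == player1:
--                             score += 15 * spaces #maximizer not guaranteed to win, unless it can place direcly into the empty spaces
--                         else:
--                             score -= 15 * spaces
--                     else:
--                         if grid[row][start] == player2:
--                             score -= 15 * spaces
--                         else:
--                             score += 15 * spaces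
--
--                 #two in a row
--                 elif end - start == 1:
--                     #weight based on spaces
--                     #for two in a row: 0 0 1 1 = 0 1 1 0 = 1 1 0 0
--
--                     if (start > 1 and grid[row][start - 2] == 0 and grid[row][start - 2] == 0): spaces += 1
--                     if (end < n_cols - 2 and grid[row][end + 1] == 0 and grid[row][end + 2] == 0): spaces += 1
--                     if grid[row][start] == player1:
--                         score += 5 if spaces >= 2 else 0
--                     else:
--                         score -= 5 if spaces >= 2 else 0
--
--                 end += 1
--                 start = end
--     return score
-- ===== SOURCE B (Python) =====
-- def horizontalEval(grid: list[list[int]], player: int):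
--     score = 0
--     n = len(grid[0])
--     for row in grid:
--         for i in range(n):
--             v = row[i]
--             if v == 0:
--                 continue
--             if i > 0 and row[i - 1] == v:
--                 continue  # not the start of a maximal run
--             if i + 2 < n and row[i + 1] == v and row[i + 2] == v and (i + 3 >= n or row[i + 3] != v):
--                 # maximal run of exactly three
--                 spaces = (i > 0 and row[i - 1] == 0) + (i + 3 < n and row[i + 3] == 0)
--                 if player == 1:
--                     score += 15 * spaces if v == 1 else -15 * spaces
--                 else:
--                     score += -15 * spaces if v == 2 else 15 * spaces
--             elif i + 1 < n and row[i + 1] == v and (i + 2 >= n or row[i + 2] != v):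
--                 # maximal run of exactly two
--                 spaces = (i > 0 and row[i - 1] == 0) + (i + 2 < n and row[i + 2] == 0)
--                 if i > 1 and row[i - 2] == 0:
--                     spaces += 1
--                 if i + 3 < n and row[i + 2] == 0 and row[i + 3] == 0:
--                     spaces += 1
--                 if spaces >= 2:
--                     score += 5 if v == 1 else -5
--     return score
-- ===== Notes on version B (the rewrite author's own statement) =====
-- stated objective: alternative
-- what changed: Replaces A's stateful two-pointer run scan with a stateless per-index fixed-window pattern match: each column index is tested independently for being the start of a maximal run of exactly 3 or exactly 2 via its neighborhood, with no run-extension loop or start/end state.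
import Mathlib
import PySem

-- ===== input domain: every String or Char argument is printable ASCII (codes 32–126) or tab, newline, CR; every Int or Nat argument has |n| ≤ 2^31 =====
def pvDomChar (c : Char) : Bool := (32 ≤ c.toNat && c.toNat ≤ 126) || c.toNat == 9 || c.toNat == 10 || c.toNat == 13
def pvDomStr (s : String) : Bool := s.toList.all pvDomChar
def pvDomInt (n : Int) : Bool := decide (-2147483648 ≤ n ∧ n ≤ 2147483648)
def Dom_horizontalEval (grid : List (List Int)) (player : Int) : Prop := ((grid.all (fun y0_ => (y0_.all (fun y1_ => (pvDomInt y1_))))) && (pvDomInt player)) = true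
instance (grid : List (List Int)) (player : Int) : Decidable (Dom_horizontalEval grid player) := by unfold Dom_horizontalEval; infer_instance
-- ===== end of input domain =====

-- B replaces A's stateful two-pointer run scan with a stateless per-index fixed-window
-- pattern match (each index tested independently for starting a maximal run of 3 or 2);
-- objective: alternative algorithm of the same cost.

-- ===== PORT A =====
-- inner while: extend `e` while the next cell equals grid[row][start]
def pvFindEnd (row : List Int) (nCols strt e : Int) : Int :=
  if h : e + 1 < nCols ∧ PySem.List.pyGetD row (e + 1) 0 = PySem.List.pyGetD row strt 0 then
    pvFindEnd row nCols strt (e + 1)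
  else e
termination_by (nCols - e).toNat
decreasing_by have := h.1; omega

theorem pv_le_pvFindEnd (row : List Int) (nCols strt e : Int) : e ≤ pvFindEnd row nCols strt e := by
  fun_induction pvFindEnd with
  | case1 => omega
  | case2 => omega

-- outer while over one row; list indexing is pyGetD with default 0 (every index A reads is
-- guarded in range on Pre_, so the default is never read there)
def pvRowLoop (row : List Int) (nCols player strt e score : Int) : Int :=
  if h : e < nCols then
    if PySem.List.pyGetD row strt 0 = 0 then
      pvRowLoop row nCols player (strt + 1) (e + 1) score
    else
      let e' := pvFindEnd row nCols strt e
      let spaces : Int :=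
        (if 0 < strt ∧ PySem.List.pyGetD row (strt - 1) 0 = 0 then 1 else 0)
        + (if e' < nCols - 1 ∧ PySem.List.pyGetD row (e' + 1) 0 = 0 then 1 else 0)
      let score' : Int :=
        if e' - strt = 2 then
          if player = 1 then
            (if PySem.List.pyGetD row strt 0 = 1 then score + 15 * spaces else score - 15 * spaces)
          else
            (if PySem.List.pyGetD row strt 0 = 2 then score - 15 * spaces else score + 15 * spaces)
        else if e' - strt = 1 then
          -- duplicated conjunct kept from A's source
          let spaces2 : Int := spaces
            + (if 1 < strt ∧ PySem.List.pyGetD row (strt - 2) 0 = 0 ∧ PySem.List.pyGetD row (strt - 2) 0 = 0 then 1 else 0)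
            + (if e' < nCols - 2 ∧ PySem.List.pyGetD row (e' + 1) 0 = 0 ∧ PySem.List.pyGetD row (e' + 2) 0 = 0 then 1 else 0)
          if PySem.List.pyGetD row strt 0 = 1 then
            score + (if 2 ≤ spaces2 then 5 else 0)
          else
            score - (if 2 ≤ spaces2 then 5 else 0)
        else score
      pvRowLoop row nCols player (e' + 1) (e' + 1) score'
  else score
termination_by (nCols - e).toNat
decreasing_by
  · omega
  · have hle := pv_le_pvFindEnd row nCols strt e
    omega

def horizontalEval (grid : List (List Int)) (player : Int) : Int :=
  let nRows : Int := grid.length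
  let nCols : Int := (PySem.List.pyGetD grid 0 ([] : List Int)).length  -- len(grid[0]); IndexError on [] is excluded by Pre_
  (PySem.List.pyRange 0 nRows 1).foldl
    (fun score r => pvRowLoop (PySem.List.pyGetD grid r ([] : List Int)) nCols player 0 0 score) 0

-- ===== PORT B =====
-- per-index window test: does a maximal run of exactly 3 / exactly 2 start at i?
def pvCell (row : List Int) (n player : Int) (sc i : Int) : Int :=
  let v := PySem.List.pyGetD row i 0
  if v = 0 then sc
  else if 0 < i ∧ PySem.List.pyGetD row (i - 1) 0 = v then sc   -- not the start of a maximal run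
  else if i + 2 < n ∧ PySem.List.pyGetD row (i + 1) 0 = v ∧ PySem.List.pyGetD row (i + 2) 0 = v
          ∧ (n ≤ i + 3 ∨ PySem.List.pyGetD row (i + 3) 0 ≠ v) then
    -- maximal run of exactly three
    let spaces : Int :=
      (if 0 < i ∧ PySem.List.pyGetD row (i - 1) 0 = 0 then 1 else 0)
      + (if i + 3 < n ∧ PySem.List.pyGetD row (i + 3) 0 = 0 then 1 else 0)
    if player = 1 then
      (if v = 1 then sc + 15 * spaces else sc + (-15) * spaces)
    else
      (if v = 2 then sc + (-15) * spaces else sc + 15 * spaces)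
  else if i + 1 < n ∧ PySem.List.pyGetD row (i + 1) 0 = v
          ∧ (n ≤ i + 2 ∨ PySem.List.pyGetD row (i + 2) 0 ≠ v) then
    -- maximal run of exactly two
    let spaces : Int :=
      (if 0 < i ∧ PySem.List.pyGetD row (i - 1) 0 = 0 then 1 else 0)
      + (if i + 2 < n ∧ PySem.List.pyGetD row (i + 2) 0 = 0 then 1 else 0)
    let spaces2 : Int := spaces
      + (if 1 < i ∧ PySem.List.pyGetD row (i - 2) 0 = 0 then 1 else 0)
      + (if i + 3 < n ∧ PySem.List.pyGetD row (i + 2) 0 = 0 ∧ PySem.List.pyGetD row (i + 3) 0 = 0 then 1 else 0)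
    if 2 ≤ spaces2 then (if v = 1 then sc + 5 else sc + (-5)) else sc
  else sc

def horizontalEval_alt (grid : List (List Int)) (player : Int) : Int :=
  let n : Int := (PySem.List.pyGetD grid 0 ([] : List Int)).length
  grid.foldl (fun sc row => (PySem.List.pyRange 0 n 1).foldl (pvCell row n player) sc) 0

-- ===== PRECONDITION & SPEC =====
-- Pre_ excludes exactly the inputs where Python A raises IndexError: the empty grid (grid[0])
-- and grids with some row shorter than the first row (grid[row][col] for col < n_cols).
def Pre_horizontalEval (grid : List (List Int)) (player : Int) : Prop :=
  grid ≠ [] ∧ ∀ row ∈ grid, (grid.headD []).length ≤ row.length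
instance (grid : List (List Int)) (player : Int) : Decidable (Pre_horizontalEval grid player) := by
  unfold Pre_horizontalEval; infer_instance

def pvWitness_horizontalEval : List (List Int) × Int := ([[0, 1, 1, 1, 0], [2, 2, 0, 0, 1]], 1)

def Spec_horizontalEval (grid : List (List Int)) (player : Int) (out : Int) : Prop := out = horizontalEval_alt grid player
instance (grid : List (List Int)) (player : Int) (out : Int) : Decidable (Spec_horizontalEval grid player out) := by unfold Spec_horizontalEval; infer_instance

-- ===== CLAIM (what is proved, stated in full; the proofs are below) =====
def Claim_equal_horizontalEval : Prop := ∀ (grid : List (List Int)) (player : Int), Dom_horizontalEval grid player → Pre_horizontalEval grid player → Spec_horizontalEval grid player (horizontalEval grid player)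

-- ===== LEMMAS AND PROOFS =====

-- facts about A's inner while: it stays in range, the whole stretch equals row[j], and it is maximal
theorem pvFindEnd_facts (row : List Int) (nCols j : Int) (e : Int) (he : e < nCols)
    (hb : ∀ i, j ≤ i → i ≤ e → PySem.List.pyGetD row i 0 = PySem.List.pyGetD row j 0) :
    e ≤ pvFindEnd row nCols j e ∧ pvFindEnd row nCols j e < nCols ∧
    (∀ i, j ≤ i → i ≤ pvFindEnd row nCols j e → PySem.List.pyGetD row i 0 = PySem.List.pyGetD row j 0) ∧
    ¬(pvFindEnd row nCols j e + 1 < nCols ∧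
       PySem.List.pyGetD row (pvFindEnd row nCols j e + 1) 0 = PySem.List.pyGetD row j 0) := by
  rw [pvFindEnd]
  by_cases h : e + 1 < nCols ∧ PySem.List.pyGetD row (e + 1) 0 = PySem.List.pyGetD row j 0
  · rw [dif_pos h]
    have hb' : ∀ i, j ≤ i → i ≤ e + 1 → PySem.List.pyGetD row i 0 = PySem.List.pyGetD row j 0 := by
      intro i h1 h2
      by_cases hie : i ≤ e
      · exact hb i h1 hie
      · have : i = e + 1 := by omega
        rw [this]; exact h.2
    have := pvFindEnd_facts row nCols j (e + 1) h.1 hb'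
    exact ⟨by omega, this.2.1, this.2.2.1, this.2.2.2⟩
  · rw [dif_neg h]
    exact ⟨le_rfl, he, hb, h⟩
termination_by (nCols - e).toNat
decreasing_by have := h.1; omega

-- a fold that never changes the accumulator
theorem pv_foldl_skip (f : Int → Int → Int) (l : List Int)
    (h : ∀ s i, i ∈ l → f s i = s) : ∀ s, l.foldl f s = s := by
  induction l with
  | nil => intro s; rfl
  | cons x xs ih =>
    intro s
    rw [List.foldl_cons, h s x (by simp)]
    exact ih (fun s i hi => h s i (by simp [hi])) s

-- main per-row lemma: A's scan from position j equals B's per-index fold over [j, n)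
set_option maxHeartbeats 2000000 in
theorem pv_row_eq (row : List Int) (n player : Int) (j : Int) (hj : 0 ≤ j)
    (hinv : j = 0 ∨ n ≤ j ∨ PySem.List.pyGetD row (j - 1) 0 ≠ PySem.List.pyGetD row j 0
            ∨ PySem.List.pyGetD row j 0 = 0)
    (sc : Int) :
    pvRowLoop row n player j j sc = (PySem.List.pyRange j n 1).foldl (pvCell row n player) sc := by
  rw [pvRowLoop]
  by_cases hjn : j < n
  case neg =>
    rw [dif_neg hjn, PySem.List.pyRange_one_eq_nil (by omega)]
    rfl
  case pos =>
    rw [dif_pos hjn, PySem.List.pyRange_one_cons hjn, List.foldl_cons]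
    by_cases hz : PySem.List.pyGetD row j 0 = 0
    · rw [if_pos hz]
      have hcell : pvCell row n player sc j = sc := by
        simp [pvCell, hz]
      rw [hcell]
      apply pv_row_eq row n player (j + 1) (by omega)
      by_cases hz1 : PySem.List.pyGetD row (j + 1) 0 = 0
      · exact Or.inr (Or.inr (Or.inr hz1))
      · refine Or.inr (Or.inr (Or.inl ?_))
        have h1 : (j + 1) - 1 = j := by ring
        rw [h1, hz]
        exact fun hc => hz1 hc.symm
    · rw [if_neg hz]
      obtain ⟨hle, hEn, hall, hend⟩ := pvFindEnd_facts row n j j hjn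
        (fun i h1 h2 => congrArg (fun t => PySem.List.pyGetD row t 0) (le_antisymm h2 h1))
      generalize hG : pvFindEnd row n j j = E at hle hEn hall hend ⊢
      -- the left-neighbour check at j is false
      have hleft : ¬(0 < j ∧ PySem.List.pyGetD row (j - 1) 0 = PySem.List.pyGetD row j 0) := by
        rcases hinv with h | h | h | h
        · omega
        · omega
        · exact fun hc => h hc.2
        · exact absurd h hz
      -- B's fold skips the indices strictly inside the run
      have hsplit : PySem.List.pyRange (j + 1) n 1
          = PySem.List.pyRange (j + 1) (E + 1) 1 ++ PySem.List.pyRange (E + 1) n 1 :=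
        PySem.List.pyRange_one_append (j + 1) (E + 1) n (by omega) (by omega)
      have hskip : ∀ s i, i ∈ PySem.List.pyRange (j + 1) (E + 1) 1 → pvCell row n player s i = s := by
        intro s i hi
        rw [PySem.List.mem_pyRange_one] at hi
        have hvi : PySem.List.pyGetD row i 0 = PySem.List.pyGetD row j 0 :=
          hall i (by omega) (by omega)
        have hvi1 : PySem.List.pyGetD row (i - 1) 0 = PySem.List.pyGetD row j 0 :=
          hall (i - 1) (by omega) (by omega)
        simp only [pvCell, hvi]
        rw [if_neg hz, if_pos ⟨by omega, hvi1⟩]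
      rw [hsplit, List.foldl_append, pv_foldl_skip _ _ hskip]
      -- A's loop continues from E + 1; so does B's remaining fold
      have hrec : ∀ s : Int, pvRowLoop row n player (E + 1) (E + 1) s
          = (PySem.List.pyRange (E + 1) n 1).foldl (pvCell row n player) s := by
        intro s
        apply pv_row_eq row n player (E + 1) (by omega)
        by_cases hlt : E + 1 < n
        · refine Or.inr (Or.inr (Or.inl ?_))
          have h1 : (E + 1) - 1 = E := by ring
          rw [h1, hall E (by omega) (by omega)]
          intro hc
          exact hend ⟨hlt, hc.symm⟩
        · exact Or.inr (Or.inl (by omega))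
      show pvRowLoop row n player (E + 1) (E + 1)
          (if E - j = 2 then
            (if player = 1 then
              (if PySem.List.pyGetD row j 0 = 1 then
                sc + 15 * ((if 0 < j ∧ PySem.List.pyGetD row (j - 1) 0 = 0 then 1 else 0)
                  + (if E < n - 1 ∧ PySem.List.pyGetD row (E + 1) 0 = 0 then 1 else 0))
              else
                sc - 15 * ((if 0 < j ∧ PySem.List.pyGetD row (j - 1) 0 = 0 then 1 else 0)
                  + (if E < n - 1 ∧ PySem.List.pyGetD row (E + 1) 0 = 0 then 1 else 0)))
            else
              (if PySem.List.pyGetD row j 0 = 2 then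
                sc - 15 * ((if 0 < j ∧ PySem.List.pyGetD row (j - 1) 0 = 0 then 1 else 0)
                  + (if E < n - 1 ∧ PySem.List.pyGetD row (E + 1) 0 = 0 then 1 else 0))
              else
                sc + 15 * ((if 0 < j ∧ PySem.List.pyGetD row (j - 1) 0 = 0 then 1 else 0)
                  + (if E < n - 1 ∧ PySem.List.pyGetD row (E + 1) 0 = 0 then 1 else 0))))
          else if E - j = 1 then
            (if PySem.List.pyGetD row j 0 = 1 then
              sc + (if 2 ≤ ((if 0 < j ∧ PySem.List.pyGetD row (j - 1) 0 = 0 then 1 else 0)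
                  + (if E < n - 1 ∧ PySem.List.pyGetD row (E + 1) 0 = 0 then 1 else 0))
                + (if 1 < j ∧ PySem.List.pyGetD row (j - 2) 0 = 0 ∧ PySem.List.pyGetD row (j - 2) 0 = 0 then 1 else 0)
                + (if E < n - 2 ∧ PySem.List.pyGetD row (E + 1) 0 = 0 ∧ PySem.List.pyGetD row (E + 2) 0 = 0 then 1 else 0)
                then 5 else 0)
            else
              sc - (if 2 ≤ ((if 0 < j ∧ PySem.List.pyGetD row (j - 1) 0 = 0 then 1 else 0)
                  + (if E < n - 1 ∧ PySem.List.pyGetD row (E + 1) 0 = 0 then 1 else 0))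
                + (if 1 < j ∧ PySem.List.pyGetD row (j - 2) 0 = 0 ∧ PySem.List.pyGetD row (j - 2) 0 = 0 then 1 else 0)
                + (if E < n - 2 ∧ PySem.List.pyGetD row (E + 1) 0 = 0 ∧ PySem.List.pyGetD row (E + 2) 0 = 0 then 1 else 0)
                then 5 else 0))
          else sc)
          = (PySem.List.pyRange (E + 1) n 1).foldl (pvCell row n player) (pvCell row n player sc j)
      rw [hrec]
      congr 1
      -- it remains to match A's score update with B's cell value at j
      by_cases h2 : E - j = 2
      · -- run of exactly three starting at j
        have hEv : E = j + 2 := by omega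
        subst hEv
        have hp1 : PySem.List.pyGetD row (j + 1) 0 = PySem.List.pyGetD row j 0 :=
          hall (j + 1) (by omega) (by omega)
        have hp2 : PySem.List.pyGetD row (j + 2) 0 = PySem.List.pyGetD row j 0 :=
          hall (j + 2) (by omega) (by omega)
        have hp3 : n ≤ j + 3 ∨ PySem.List.pyGetD row (j + 3) 0 ≠ PySem.List.pyGetD row j 0 := by
          by_cases hlt : j + 3 < n
          · exact Or.inr (fun hc => hend ⟨by omega, by rw [show j + 2 + 1 = j + 3 by ring]; exact hc⟩)
          · exact Or.inl (by omega)
        rw [if_pos h2]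
        simp only [pvCell, if_neg hz, if_neg hleft,
          if_pos (⟨by omega, hp1, hp2, hp3⟩ :
            j + 2 < n ∧ PySem.List.pyGetD row (j + 1) 0 = PySem.List.pyGetD row j 0
            ∧ PySem.List.pyGetD row (j + 2) 0 = PySem.List.pyGetD row j 0
            ∧ (n ≤ j + 3 ∨ PySem.List.pyGetD row (j + 3) 0 ≠ PySem.List.pyGetD row j 0))]
        have hc1 : (j + 2 < n - 1 ∧ PySem.List.pyGetD row (j + 2 + 1) 0 = 0)
            ↔ (j + 3 < n ∧ PySem.List.pyGetD row (j + 3) 0 = 0) := by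
          rw [show j + 2 + 1 = j + 3 by ring]
          constructor <;> (rintro ⟨a, b⟩; exact ⟨by omega, b⟩)
        simp only [hc1]
        split_ifs <;> ring
      · by_cases h1 : E - j = 1
        · -- run of exactly two starting at j
          have hEv : E = j + 1 := by omega
          subst hEv
          have hp1 : PySem.List.pyGetD row (j + 1) 0 = PySem.List.pyGetD row j 0 :=
            hall (j + 1) (by omega) (by omega)
          have hp2 : n ≤ j + 2 ∨ PySem.List.pyGetD row (j + 2) 0 ≠ PySem.List.pyGetD row j 0 := by
            by_cases hlt : j + 2 < n
            · exact Or.inr (fun hc => hend ⟨by omega, by rw [show j + 1 + 1 = j + 2 by ring]; exact hc⟩)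
            · exact Or.inl (by omega)
          have hno3 : ¬(j + 2 < n ∧ PySem.List.pyGetD row (j + 1) 0 = PySem.List.pyGetD row j 0
              ∧ PySem.List.pyGetD row (j + 2) 0 = PySem.List.pyGetD row j 0
              ∧ (n ≤ j + 3 ∨ PySem.List.pyGetD row (j + 3) 0 ≠ PySem.List.pyGetD row j 0)) := by
            rintro ⟨ha, -, hb, -⟩
            rcases hp2 with h | h
            · omega
            · exact h hb
          rw [if_neg h2, if_pos h1]
          simp only [pvCell, if_neg hz, if_neg hleft, if_neg hno3,
            if_pos (⟨by omega, hp1, hp2⟩ :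
              j + 1 < n ∧ PySem.List.pyGetD row (j + 1) 0 = PySem.List.pyGetD row j 0
              ∧ (n ≤ j + 2 ∨ PySem.List.pyGetD row (j + 2) 0 ≠ PySem.List.pyGetD row j 0))]
          have hc1 : (j + 1 < n - 1 ∧ PySem.List.pyGetD row (j + 1 + 1) 0 = 0)
              ↔ (j + 2 < n ∧ PySem.List.pyGetD row (j + 2) 0 = 0) := by
            rw [show j + 1 + 1 = j + 2 by ring]
            constructor <;> (rintro ⟨a, b⟩; exact ⟨by omega, b⟩)
          have hc2 : (1 < j ∧ PySem.List.pyGetD row (j - 2) 0 = 0 ∧ PySem.List.pyGetD row (j - 2) 0 = 0)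
              ↔ (1 < j ∧ PySem.List.pyGetD row (j - 2) 0 = 0) := by
            constructor
            · rintro ⟨a, b, -⟩; exact ⟨a, b⟩
            · rintro ⟨a, b⟩; exact ⟨a, b, b⟩
          have hc3 : (j + 1 < n - 2 ∧ PySem.List.pyGetD row (j + 1 + 1) 0 = 0 ∧ PySem.List.pyGetD row (j + 1 + 2) 0 = 0)
              ↔ (j + 3 < n ∧ PySem.List.pyGetD row (j + 2) 0 = 0 ∧ PySem.List.pyGetD row (j + 3) 0 = 0) := by
            rw [show j + 1 + 1 = j + 2 by ring, show j + 1 + 2 = j + 3 by ring]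
            constructor <;> (rintro ⟨a, b, c⟩; exact ⟨by omega, b, c⟩)
          simp only [hc1, hc2, hc3]
          split_ifs <;> omega
        · -- run of length 1 or at least 4: both sides leave the score unchanged
          rw [if_neg h2, if_neg h1]
          have hno3 : ¬(j + 2 < n ∧ PySem.List.pyGetD row (j + 1) 0 = PySem.List.pyGetD row j 0
              ∧ PySem.List.pyGetD row (j + 2) 0 = PySem.List.pyGetD row j 0
              ∧ (n ≤ j + 3 ∨ PySem.List.pyGetD row (j + 3) 0 ≠ PySem.List.pyGetD row j 0)) := by
            rintro ⟨ha, hb, hc, hd⟩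
            by_cases ht0 : E = j
            · rw [ht0] at hend
              exact hend ⟨by omega, hb⟩
            · have hge : j + 3 ≤ E := by omega
              rcases hd with h | h
              · omega
              · exact h (hall (j + 3) (by omega) (by omega))
          have hno2 : ¬(j + 1 < n ∧ PySem.List.pyGetD row (j + 1) 0 = PySem.List.pyGetD row j 0
              ∧ (n ≤ j + 2 ∨ PySem.List.pyGetD row (j + 2) 0 ≠ PySem.List.pyGetD row j 0)) := by
            rintro ⟨ha, hb, hc⟩
            by_cases ht0 : E = j
            · rw [ht0] at hend
              exact hend ⟨by omega, hb⟩
            · have hge : j + 3 ≤ E := by omega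
              rcases hc with h | h
              · omega
              · exact h (hall (j + 2) (by omega) (by omega))
          simp only [pvCell, if_neg hz, if_neg hleft, if_neg hno3, if_neg hno2]
termination_by (n - j).toNat
decreasing_by all_goals omega

-- ===== VERDICT (by name: the statement is the Claim_ definition above) =====
theorem horizontalEval_spec : Claim_equal_horizontalEval := by
  intro grid player _hD _hPre
  unfold Spec_horizontalEval horizontalEval horizontalEval_alt
  dsimp only
  rw [show (PySem.List.pyRange 0 (grid.length : Int) 1) = PySem.List.pyRange 0 (PySem.List.len grid) 1 from by simp [PySem.List.len]]
  rw [PySem.List.foldl_pyRange_zero_pyGetD grid ([] : List Int)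
        (fun score row => pvRowLoop row ((PySem.List.pyGetD grid 0 ([] : List Int)).length : Int) player 0 0 score) 0]
  apply PySem.List.foldl_congr_mem
  intro sc r _hr
  exact pv_row_eq r ((PySem.List.pyGetD grid 0 ([] : List Int)).length : Int) player 0 le_rfl (Or.inl rfl) sc
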